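-- pv_equiv track=rewrite | github.com/fillund/Advent-of-code | 2025/Day3.py | bank_joltage
-- ===== SOURCE A (Python) =====
-- def lint(_list: list) -> int:
--     s = [str(i) for i in _list]
--     return int(''.join(s))
--
-- def max_remove(l:list[int]) -> list[int]:
--     vals = []
--     for p in range(len(l)):
--         c = l.copy()
--         c.pop(p)
--         vals.append(c)
--     return max(vals, key=lint)
--
-- def bank_joltage(bank:str, active_batteries=2) -> int:
--     bank_int = [int(c) for c in bank]
--     jolt_list = list(bank_int[-active_batteries:])
--     rev_list = list(reversed(bank_int[:-active_batteries]))
--     assert(len(rev_list)+len(jolt_list) == len(bank_int))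
--     for b in rev_list:
--         if b >= jolt_list[0]:
--             jolt_list.insert(0, b)
--             jolt_list = max_remove(jolt_list)
--     return lint(jolt_list)
-- ===== SOURCE B (Python) =====
-- def bank_joltage(bank: str, active_batteries=2) -> int:
--     digits = [int(c) for c in bank]
--     jolt = digits[-active_batteries:]
--     for b in reversed(digits[:-active_batteries]):
--         if b >= jolt[0]:
--             jolt.insert(0, b)
--             # drop the first digit that is smaller than its successor,
--             # or the last digit if the sequence is non-increasing
--             for i in range(len(jolt) - 1):
--                 if jolt[i] < jolt[i + 1]:
--                     del jolt[i]
--                     break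
--             else:
--                 jolt.pop()
--     return int(''.join(str(d) for d in jolt))
-- ===== Notes on version B (the rewrite author's own statement) =====
-- stated objective: faster
-- what changed: max_remove's enumeration of all n single-deletion copies followed by max(..., key=lint) is replaced by a single left-to-right scan that deletes the first digit smaller than its successor (or the last digit of a non-increasing sequence), which provably yields the identical list.
import Mathlib
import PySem

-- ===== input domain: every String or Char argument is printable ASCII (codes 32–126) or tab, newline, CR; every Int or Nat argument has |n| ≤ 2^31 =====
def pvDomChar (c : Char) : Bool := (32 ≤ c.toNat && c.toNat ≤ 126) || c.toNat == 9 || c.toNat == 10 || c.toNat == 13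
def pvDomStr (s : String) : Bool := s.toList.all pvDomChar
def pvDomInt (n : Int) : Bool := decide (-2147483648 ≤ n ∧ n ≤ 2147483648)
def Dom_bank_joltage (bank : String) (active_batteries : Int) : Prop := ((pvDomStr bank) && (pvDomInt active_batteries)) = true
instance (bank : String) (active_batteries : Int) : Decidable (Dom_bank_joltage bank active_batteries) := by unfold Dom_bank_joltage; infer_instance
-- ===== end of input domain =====

-- B replaces A's max_remove (build all n single-deletion copies, take max by numeric value)
-- with a one-pass scan that deletes the first digit smaller than its successor (or the last
-- digit of a non-increasing sequence); objective: faster (O(m) per insertion instead of O(m^2)).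

-- ===== PORT A =====
-- int(s): ported by hand as a decimal digit fold — exact for the nonempty all-digit
-- strings that occur here (Pre_ guarantees bank is all digits, so every string joined
-- from str(d) of its digits is a nonempty digit string).
def pvDecVal (cs : List Char) : Int := cs.foldl (fun a c => a * 10 + ((c.toNat : Int) - 48)) 0

-- lint(_list) = int(''.join([str(i) for i in _list]))
def lintP (l : List Int) : Int := pvDecVal (PySem.Str.join "" (l.map PySem.Int.toStr)).toList

-- max_remove(l): all single-deletion copies, then max(vals, key=lint)
-- (Python max raises on an empty list; it is only reached with len(l) ≥ 1, so the
-- [] default of getD is never used under Pre_)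
def max_removeP (l : List Int) : List Int :=
  let vals := (PySem.List.pyRange 0 (l.length : Int) 1).foldl
    (fun vals p => vals ++ [((PySem.List.pop? l p).map Prod.snd).getD []]) []
  (PySem.List.max? vals lintP).getD []

def bank_joltage (bank : String) (active_batteries : Int) : Int :=
  -- int(c): hand-ported as code-point arithmetic, exact for the digit chars Pre_ admits
  let bank_int := bank.toList.map (fun c => (c.toNat : Int) - 48)
  let jolt0 := PySem.List.slice bank_int (some (-active_batteries)) none
  let rev_list := (PySem.List.slice bank_int none (some (-active_batteries))).reverse
  -- the assert always holds: the two slices partition bank_int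
  let jolt := rev_list.foldl (fun j b =>
    match j with
    | [] => j            -- Python raises IndexError on jolt_list[0] here; outside Pre_
    | h :: _ => if h ≤ b then max_removeP (b :: j) else j) jolt0
  lintP jolt

-- ===== PORT B =====
-- inner for/else of Source B: remove the first digit smaller than its successor, else the last
def rm1 (l : List Int) : List Int :=
  match l with
  | [] => []
  | [_] => []
  | x :: y :: t => if x < y then y :: t else x :: rm1 (y :: t)

def bank_joltage_alt (bank : String) (active_batteries : Int) : Int :=
  let digits := bank.toList.map (fun c => (c.toNat : Int) - 48)
  let jolt0 := PySem.List.slice digits (some (-active_batteries)) none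
  let rev_list := (PySem.List.slice digits none (some (-active_batteries))).reverse
  let jolt := rev_list.foldl (fun j b =>
    match j with
    | [] => j            -- Python raises IndexError on jolt[0] here; outside Pre_
    | h :: _ => if h ≤ b then rm1 (b :: j) else j) jolt0
  pvDecVal (PySem.Str.join "" (jolt.map PySem.Int.toStr)).toList

-- ===== PRECONDITION & SPEC =====
-- Pre_ excludes exactly the inputs where A raises: an empty or non-digit bank
-- (int(c) / int('') ValueError), and a negative active_batteries whose magnitude
-- reaches len(bank) (jolt_list starts empty and jolt_list[0] raises IndexError).
def Pre_bank_joltage (bank : String) (active_batteries : Int) : Prop :=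
  PySem.Str.strIsdigit bank = true ∧
    (0 ≤ active_batteries ∨ -active_batteries < PySem.Str.len bank)
instance (bank : String) (active_batteries : Int) : Decidable (Pre_bank_joltage bank active_batteries) := by
  unfold Pre_bank_joltage; infer_instance

def pvWitness_bank_joltage : String × Int := ("75", 2)

def Spec_bank_joltage (bank : String) (active_batteries : Int) (out : Int) : Prop := out = bank_joltage_alt bank active_batteries
instance (bank : String) (active_batteries : Int) (out : Int) : Decidable (Spec_bank_joltage bank active_batteries out) := by unfold Spec_bank_joltage; infer_instance

-- ===== CLAIM (what is proved, stated in full; the proofs are below) =====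
def Claim_equal_bank_joltage : Prop := ∀ (bank : String) (active_batteries : Int), Dom_bank_joltage bank active_batteries → Pre_bank_joltage bank active_batteries → Spec_bank_joltage bank active_batteries (bank_joltage bank active_batteries)

-- ===== LEMMAS AND PROOFS =====

/-- the decimal value of a list of digits, as both `lint`s compute it -/
def pvV (l : List Int) : Int := l.foldl (fun a d => a * 10 + d) 0

def pvDigits (l : List Int) : Prop := ∀ d ∈ l, 0 ≤ d ∧ d ≤ 9

theorem pvV_shift (ys : List Int) (a : Int) :
    ys.foldl (fun a d => a * 10 + d) a = a * 10 ^ ys.length + pvV ys := by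
  induction ys generalizing a with
  | nil => simp [pvV]
  | cons y t ih =>
    simp only [List.foldl, pvV, List.length_cons]
    rw [ih (a * 10 + y), ih (0 * 10 + y)]
    ring

theorem pvV_cons (a : Int) (t : List Int) :
    pvV (a :: t) = a * 10 ^ t.length + pvV t := by
  show List.foldl (fun a d => a * 10 + d) 0 (a :: t) = _
  simp only [List.foldl]
  rw [pvV_shift]
  ring_nf

theorem pvV_bounds (l : List Int) (h : pvDigits l) : 0 ≤ pvV l ∧ pvV l < 10 ^ l.length := by
  induction l with
  | nil => simp [pvV]
  | cons a t ih =>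
    obtain ⟨ht0, ht1⟩ := ih (fun d hd => h d (by simp [hd]))
    obtain ⟨ha0, ha9⟩ := h a (by simp)
    rw [pvV_cons]
    constructor
    · positivity
    · have hp : (0:Int) < 10 ^ t.length := by positivity
      calc a * 10 ^ t.length + pvV t < a * 10 ^ t.length + 10 ^ t.length := by omega
        _ = (a + 1) * 10 ^ t.length := by ring
        _ ≤ 10 * 10 ^ t.length := by
            have : a + 1 ≤ 10 := by omega
            exact mul_le_mul_of_nonneg_right this (by positivity)
        _ = 10 ^ (a :: t).length := by rw [List.length_cons]; ring

theorem pvV_inj (xs : List Int) : ∀ ys, pvDigits xs → pvDigits ys →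
    xs.length = ys.length → pvV xs = pvV ys → xs = ys := by
  induction xs with
  | nil =>
    intro ys _ _ hlen _
    cases ys with
    | nil => rfl
    | cons b s => simp at hlen
  | cons a t ih =>
    intro ys hx hy hlen hv
    cases ys with
    | nil => simp at hlen
    | cons b s =>
      have hlen' : t.length = s.length := by simpa using hlen
      have hdt : pvDigits t := fun d hd => hx d (by simp [hd])
      have hds : pvDigits s := fun d hd => hy d (by simp [hd])
      obtain ⟨ht0, ht1⟩ := pvV_bounds t hdt
      obtain ⟨hs0, hs1⟩ := pvV_bounds s hds
      rw [pvV_cons, pvV_cons, hlen'] at hv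
      have hab : a = b := by
        by_contra hne
        rcases lt_or_gt_of_ne hne with hlt | hgt
        · have h1 : a + 1 ≤ b := by omega
          have : (a + 1) * 10 ^ s.length ≤ b * 10 ^ s.length :=
            mul_le_mul_of_nonneg_right (by exact_mod_cast h1) (by positivity)
          have : a * 10 ^ s.length + pvV t < b * 10 ^ s.length + pvV s := by
            rw [← hlen'] at hs1 ⊢
            nlinarith
          omega
        · have h1 : b + 1 ≤ a := by omega
          have : (b + 1) * 10 ^ s.length ≤ a * 10 ^ s.length :=
            mul_le_mul_of_nonneg_right (by exact_mod_cast h1) (by positivity)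
          have : b * 10 ^ s.length + pvV s < a * 10 ^ s.length + pvV t := by
            nlinarith
          omega
      subst hab
      have : pvV t = pvV s := by omega
      rw [ih s hdt hds hlen' this]

/-- strict head comparison: a bigger leading digit wins whatever the equal-length tails are -/
theorem pvV_head_lt (a b : Int) (xs ys : List Int) (hx : pvDigits xs) (hy : pvDigits ys)
    (hlen : xs.length = ys.length) (hab : b < a) : pvV (b :: ys) < pvV (a :: xs) := by
  obtain ⟨hx0, hx1⟩ := pvV_bounds xs hx
  obtain ⟨hy0, hy1⟩ := pvV_bounds ys hy
  rw [pvV_cons, pvV_cons, ← hlen] at *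
  have h1 : b + 1 ≤ a := by omega
  have : (b + 1) * 10 ^ xs.length ≤ a * 10 ^ xs.length :=
    mul_le_mul_of_nonneg_right (by exact_mod_cast h1) (by positivity)
  nlinarith

theorem rm1_length (l : List Int) : (rm1 l).length = l.length - 1 := by
  induction l using rm1.induct with
  | case1 => simp [rm1]
  | case2 h => simp [rm1]
  | case3 x y t hxy => simp [rm1, hxy]
  | case4 x y t hxy ih =>
    rw [rm1, if_neg hxy]
    simp only [List.length_cons] at ih ⊢
    omega

theorem rm1_subset (l : List Int) : ∀ d ∈ rm1 l, d ∈ l := by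
  induction l using rm1.induct with
  | case1 => simp [rm1]
  | case2 h => simp [rm1]
  | case3 x y t hxy => intro d hd; rw [rm1, if_pos hxy] at hd; simp [hd]
  | case4 x y t hxy ih =>
    intro d hd
    rw [rm1, if_neg hxy] at hd
    rcases List.mem_cons.mp hd with h | h
    · simp [h]
    · have := ih d h
      simp at this ⊢
      tauto

theorem rm1_is_erase (l : List Int) (hne : l ≠ []) : ∃ i < l.length, rm1 l = l.eraseIdx i := by
  induction l using rm1.induct with
  | case1 => exact absurd rfl hne
  | case2 h => exact ⟨0, by simp, by simp [rm1]⟩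
  | case3 x y t hxy => exact ⟨0, by simp, by rw [rm1, if_pos hxy]; simp⟩
  | case4 x y t hxy ih =>
    obtain ⟨i, hi, heq⟩ := ih (by simp)
    refine ⟨i + 1, ?_, ?_⟩
    · simp only [List.length_cons] at hi ⊢; omega
    · rw [rm1, if_neg hxy, List.eraseIdx_cons_succ, heq]

/-- KEY: among all single deletions, the one `rm1` makes has the maximal value -/
theorem rm1_max (l : List Int) (hd : pvDigits l) :
    ∀ p < l.length, pvV (l.eraseIdx p) ≤ pvV (rm1 l) := by
  induction l using rm1.induct with
  | case1 => intro p hp; simp at hp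
  | case2 h =>
    intro p hp
    simp only [List.length_singleton] at hp
    interval_cases p
    simp [rm1]
  | case3 x y t hxy =>
    -- x < y : rm1 removes x; any other deletion keeps x in front of a same-length tail
    have hds : pvDigits t := fun d hdm => hd d (by simp [hdm])
    have hdt : pvDigits (y :: t) := fun d hdm => hd d (by simp at hdm ⊢; tauto)
    intro p hp
    rw [rm1, if_pos hxy]
    cases p with
    | zero => simp
    | succ q =>
      rw [List.eraseIdx_cons_succ]
      have hq : q < (y :: t).length := by simpa using hp
      have hdq : pvDigits ((y :: t).eraseIdx q) :=
        fun d hdm => hdt d (List.mem_of_mem_eraseIdx hdm)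
      have hlq : ((y :: t).eraseIdx q).length = t.length := by
        rw [List.length_eraseIdx, if_pos hq]
        simp
      exact le_of_lt (pvV_head_lt y x _ _ hds hdq hlq.symm hxy)
  | case4 x y t hxy ih =>
    have hxy' : y ≤ x := by omega
    have hds : pvDigits t := fun d hdm => hd d (by simp [hdm])
    have hdt : pvDigits (y :: t) := fun d hdm => hd d (by simp at hdm ⊢; tauto)
    have hdrm : pvDigits (rm1 (y :: t)) := fun d hdm => hdt d (rm1_subset _ d hdm)
    have hlrm : (rm1 (y :: t)).length = t.length := by simp [rm1_length]
    intro p hp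
    rw [rm1, if_neg hxy]
    cases p with
    | zero =>
      rw [List.eraseIdx_cons_zero]
      rcases lt_or_eq_of_le hxy' with hlt | heq
      · exact le_of_lt (pvV_head_lt x y _ _ hdrm hds hlrm hlt)
      · have h0 : pvV t ≤ pvV (rm1 (y :: t)) := by
          have := ih hdt 0 (by simp)
          simpa using this
        rw [pvV_cons, pvV_cons, hlrm, ← heq]
        exact add_le_add le_rfl h0
    | succ q =>
      rw [List.eraseIdx_cons_succ]
      have hq : q < (y :: t).length := by simpa using hp
      have h0 : pvV ((y :: t).eraseIdx q) ≤ pvV (rm1 (y :: t)) := ih hdt q hq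
      have hlq : ((y :: t).eraseIdx q).length = t.length := by
        rw [List.length_eraseIdx, if_pos hq]
        simp
      rw [pvV_cons, pvV_cons, hlrm, hlq]
      exact add_le_add le_rfl h0

theorem toChars_digit (d : Int) (h0 : 0 ≤ d) (h9 : d ≤ 9) :
    PySem.Int.toChars d = [Char.ofNat (d.toNat + 48)] ∧
      ((Char.ofNat (d.toNat + 48)).toNat : Int) - 48 = d := by
  interval_cases d <;> exact ⟨by decide, by decide⟩

theorem lintP_eq_pvV (l : List Int) (h : pvDigits l) : lintP l = pvV l := by
  unfold lintP
  rw [PySem.Str.toList_join]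
  have hmap : (l.map PySem.Int.toStr).map String.toList
      = (l.map (fun d => Char.ofNat (d.toNat + 48))).map (fun c => [c]) := by
    simp only [List.map_map]
    refine List.map_congr_left (fun d hd => ?_)
    obtain ⟨hc, _⟩ := toChars_digit d (h d hd).1 (h d hd).2
    simpa [PySem.Int.toList_toStr] using hc
  rw [hmap]
  have hsep : ("" : String).toList = ([] : List Char) := by decide
  rw [hsep, PySem.Chars.join_nil_singletons]
  unfold pvDecVal pvV
  rw [List.foldl_map]
  exact PySem.List.foldl_congr_mem l _ _ 0 (fun acc d hd => by
    obtain ⟨_, hv⟩ := toChars_digit d (h d hd).1 (h d hd).2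
    rw [hv])

theorem max_core (l : List Int) (h : pvDigits l) (hne : l ≠ []) :
    (PySem.List.max? ((List.range l.length).map (fun k => l.eraseIdx k)) lintP).getD []
      = rm1 l := by
  set vals := (List.range l.length).map (fun k => l.eraseIdx k) with hv
  have hvne : vals ≠ [] := by
    simp only [hv, ne_eq, List.map_eq_nil_iff, List.range_eq_nil]
    exact fun hlen => hne (List.eq_nil_of_length_eq_zero hlen)
  obtain ⟨m, hm⟩ : ∃ m, PySem.List.max? vals lintP = some m := by
    cases hmm : PySem.List.max? vals lintP with
    | none => exact absurd ((PySem.List.max?_eq_none_iff vals lintP).mp hmm) hvne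
    | some m => exact ⟨m, rfl⟩
  rw [hm]
  simp only [Option.getD_some]
  -- m is a single deletion of l
  obtain ⟨k, hk, hmk⟩ : ∃ k < l.length, m = l.eraseIdx k := by
    have := PySem.List.max?_mem hm
    rw [hv] at this
    simp only [List.mem_map, List.mem_range] at this
    obtain ⟨k, hk, hkm⟩ := this
    exact ⟨k, hk, hkm.symm⟩
  have hdm : pvDigits m := by
    rw [hmk]
    exact fun d hdm => h d (List.mem_of_mem_eraseIdx hdm)
  have hdrm : pvDigits (rm1 l) := fun d hdm => h d (rm1_subset l d hdm)
  -- rm1 l is also a candidate, so V (rm1 l) ≤ V m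
  obtain ⟨i, hi, hieq⟩ := rm1_is_erase l hne
  have hrm_mem : rm1 l ∈ vals := by
    rw [hv, hieq]
    exact List.mem_map.mpr ⟨i, List.mem_range.mpr hi, rfl⟩
  have h1 : pvV (rm1 l) ≤ pvV m := by
    have := PySem.List.max?_isMax hm (rm1 l) hrm_mem
    rwa [lintP_eq_pvV _ hdrm, lintP_eq_pvV _ hdm] at this
  have h2 : pvV m ≤ pvV (rm1 l) := hmk ▸ rm1_max l h k hk
  have hlen : m.length = (rm1 l).length := by
    rw [hmk, rm1_length, List.length_eraseIdx]
    simp [hk]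
  exact pvV_inj m (rm1 l) hdm hdrm hlen (le_antisymm h2 h1)

theorem max_removeP_eq_rm1 (l : List Int) (h : pvDigits l) (hne : l ≠ []) :
    max_removeP l = rm1 l := by
  unfold max_removeP
  have hfold : ∀ (xs : List Int) (acc : List (List Int)),
      xs.foldl (fun vals p => vals ++ [((PySem.List.pop? l p).map Prod.snd).getD []]) acc
        = acc ++ xs.map (fun p => ((PySem.List.pop? l p).map Prod.snd).getD []) := by
    intro xs
    induction xs with
    | nil => simp
    | cons p t ih => intro acc; simp [ih]
  have hn : (((l.length : Int)) - 0).toNat = l.length := by simp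
  rw [PySem.List.pyRange_one, hfold, List.nil_append, List.map_map, hn]
  refine Eq.trans (congrArg (fun v => (PySem.List.max? v lintP).getD [])
      (List.map_congr_left fun k hk => ?_)) (max_core l h hne)
  have hk' : k < l.length := List.mem_range.mp hk
  simp [PySem.List.pop?_natCast l k hk']

theorem isdigit_eq_isDigit (c : Char) : PySem.Chars.isdigit c = c.isDigit := by
  simp [PySem.Chars.isdigit, Char.isDigit, Char.le_def]
  rfl

theorem char_digit_val (c : Char) (h : c.isDigit = true) :
    0 ≤ (c.toNat : Int) - 48 ∧ (c.toNat : Int) - 48 ≤ 9 := by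
  have h2 : 48 ≤ c.toNat ∧ c.toNat ≤ 57 := by simp [Char.isDigit] at h; exact h
  omega

theorem fold_eq (rev : List Int) : ∀ (j : List Int), pvDigits rev → pvDigits j →
    j ≠ [] →
    rev.foldl (fun j b =>
        match j with
        | [] => j
        | h :: _ => if h ≤ b then max_removeP (b :: j) else j) j
      = rev.foldl (fun j b =>
        match j with
        | [] => j
        | h :: _ => if h ≤ b then rm1 (b :: j) else j) j
    ∧ pvDigits (rev.foldl (fun j b =>
        match j with
        | [] => j
        | h :: _ => if h ≤ b then rm1 (b :: j) else j) j)
    ∧ rev.foldl (fun j b =>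
        match j with
        | [] => j
        | h :: _ => if h ≤ b then rm1 (b :: j) else j) j ≠ [] := by
  induction rev with
  | nil => exact fun j _ hdj hne => ⟨rfl, hdj, hne⟩
  | cons b t ih =>
    intro j hdr hdj hne
    have hdb : 0 ≤ b ∧ b ≤ 9 := hdr b (by simp)
    have hdt : pvDigits t := fun d hdm => hdr d (by simp [hdm])
    cases j with
    | nil => exact absurd rfl hne
    | cons h0 jt =>
      simp only [List.foldl]
      by_cases hcmp : h0 ≤ b
      · have hdbj : pvDigits (b :: h0 :: jt) := by
          intro d hdm
          rcases List.mem_cons.mp hdm with hh | hh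
          · exact hh ▸ hdb
          · exact hdj d hh
        have hrw : max_removeP (b :: h0 :: jt) = rm1 (b :: h0 :: jt) :=
          max_removeP_eq_rm1 _ hdbj (by simp)
        have hdnext : pvDigits (rm1 (b :: h0 :: jt)) :=
          fun d hdm => hdbj d (rm1_subset _ d hdm)
        have hnenext : rm1 (b :: h0 :: jt) ≠ [] := by
          have := rm1_length (b :: h0 :: jt)
          intro hnil
          rw [hnil] at this
          simp at this
        simp only [hcmp, if_true, hrw]
        exact ih _ hdt hdnext hnenext
      · simp only [hcmp, if_false]
        exact ih _ hdt hdj hne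

-- ===== VERDICT (by name: the statement is the Claim_ definition above) =====
theorem bank_joltage_spec : Claim_equal_bank_joltage := by
  intro bank ab _hdom hpre
  obtain ⟨hisd, hab'⟩ := hpre
  rw [PySem.Str.strIsdigit_eq] at hisd
  simp only [PySem.Chars.strIsdigit, Bool.and_eq_true, Bool.not_eq_eq_eq_not, Bool.not_true,
    List.isEmpty_eq_false_iff, List.all_eq_true] at hisd
  obtain ⟨hne, hdig'⟩ := hisd
  have hdig : ∀ c ∈ bank.toList, c.isDigit = true := fun c hc => by
    rw [← isdigit_eq_isDigit]; exact hdig' c hc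
  have hab : 0 ≤ ab ∨ -ab < (bank.toList.length : Int) := by
    rwa [PySem.Str.len_eq] at hab' 
  unfold Spec_bank_joltage bank_joltage bank_joltage_alt
  simp only []
  set digitsL := bank.toList.map (fun c => (c.toNat : Int) - 48) with hdL
  have hddig : pvDigits digitsL := by
    intro d hdm
    rw [hdL] at hdm
    obtain ⟨c, hc, hcd⟩ := List.mem_map.mp hdm
    exact hcd ▸ char_digit_val c (hdig c hc)
  set jolt0 := PySem.List.slice digitsL (some (-ab)) none with hj0
  set rev := (PySem.List.slice digitsL none (some (-ab))).reverse with hrv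
  have hdj0 : pvDigits jolt0 := by
    intro d hdm
    exact hddig d (PySem.List.mem_of_mem_slice digitsL _ _ (hj0 ▸ hdm))
  have hdrev : pvDigits rev := by
    intro d hdm
    rw [hrv, List.mem_reverse] at hdm
    exact hddig d (PySem.List.mem_of_mem_slice digitsL _ _ hdm)
  have hlen : 1 ≤ digitsL.length := by
    rw [hdL, List.length_map]
    cases hx : bank.toList with
    | nil => exact absurd hx hne
    | cons c t => simp
  have hj0ne : jolt0 ≠ [] := by
    rw [hj0, PySem.List.slice_some_none]
    have hclamp : PySem.List.clampIdx digitsL.length (-ab) < digitsL.length := by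
      rcases lt_trichotomy ab 0 with hlt | heq | hgt
      · have h1 : -ab = ((-ab).toNat : Int) := by omega
        rw [h1, PySem.List.clampIdx_natCast]
        have h2 : -ab < (digitsL.length : Int) := by
          rcases hab with h | h
          · omega
          · rwa [hdL, List.length_map]
        omega
      · subst heq
        rw [show (-(0:Int)) = ((0:ℕ) : Int) by norm_num, PySem.List.clampIdx_natCast]
        omega
      · have h1 : 0 < ab.toNat := by omega
        have h2 : -ab = -(ab.toNat : Int) := by omega
        rw [h2, PySem.List.clampIdx_neg_natCast _ _ h1]
        omega
    intro hnil
    have := List.drop_eq_nil_iff.mp hnil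
    omega
  obtain ⟨heq, _, _⟩ := fold_eq rev jolt0 hdrev hdj0 hj0ne
  rw [heq]
  rfl
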